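-- pv_equiv track=rewrite | github.com/renalvojr/evo-house | evo_house/graph.py | join_graphs
-- ===== SOURCE A (Python) =====
-- def join_graphs(graph1: dict[str, set[str]],graph2: dict[str, set[str]]):
--     merged_graph = graph1.copy()  # Começa com uma cópia de dict1
--
--     for key, value in graph2.items():
--         if key in merged_graph:
--             merged_graph[key] = merged_graph[key].union(value)
--         else:
--             merged_graph[key] = value
--
--     return merged_graph
-- ===== SOURCE B (Python) =====
-- def join_graphs(graph1: dict[str, set[str]], graph2: dict[str, set[str]]):
--     # Stage 1: build a skeleton with every key (first-occurrence order) mapped to a fresh empty set.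
--     merged = {k: set() for g in (graph1, graph2) for k in g}
--     # Stage 2: stream every (key, neighbor) edge of both graphs into its bucket, one element at a time.
--     for g in (graph1, graph2):
--         for k, vs in g.items():
--             bucket = merged[k]
--             for v in vs:
--                 bucket.add(v)
--     return merged
-- ===== Notes on version B (the rewrite author's own statement) =====
-- stated objective: alternative
-- what changed: Instead of copying graph1 and patching it with per-key set unions from graph2 (branching on key presence), B first builds a skeleton dict of all keys mapped to empty sets, then streams every individual (key, neighbor) edge of both graphs into its bucket; no copy, no membership branch, no set-union operation remains.
import Mathlib
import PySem

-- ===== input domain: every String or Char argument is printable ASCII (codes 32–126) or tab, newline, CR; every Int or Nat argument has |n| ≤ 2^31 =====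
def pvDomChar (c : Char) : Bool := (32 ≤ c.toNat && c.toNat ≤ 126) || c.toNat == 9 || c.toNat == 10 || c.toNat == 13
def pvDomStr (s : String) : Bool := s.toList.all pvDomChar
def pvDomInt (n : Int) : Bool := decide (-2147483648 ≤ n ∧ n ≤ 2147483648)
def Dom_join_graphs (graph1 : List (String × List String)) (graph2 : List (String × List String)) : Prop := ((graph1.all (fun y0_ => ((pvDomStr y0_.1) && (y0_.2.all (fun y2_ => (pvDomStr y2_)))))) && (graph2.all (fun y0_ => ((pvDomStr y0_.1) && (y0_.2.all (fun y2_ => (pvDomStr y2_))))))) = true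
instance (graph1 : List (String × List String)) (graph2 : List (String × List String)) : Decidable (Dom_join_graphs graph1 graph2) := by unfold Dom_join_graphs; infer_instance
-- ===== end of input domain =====

-- B replaces A's copy-then-patch merge (copy graph1, branch on key presence, union whole
-- sets) by two staged passes: build a skeleton dict of all keys mapped to empty sets, then
-- stream every individual (key, neighbor) edge of both graphs into its bucket; same cost.
-- Equivalence is about the returned value (A's result shares set objects with its inputs,
-- B's sets are fresh — not observable here).

-- ===== PORT A =====
-- merged_graph = graph1.copy(); for key, value in graph2.items(): branch on membership; return merged_graph
def join_graphs (graph1 : List (String × List String)) (graph2 : List (String × List String)) : List (String × List String) :=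
  let merged := PySem.Dict.mk graph1
  (graph2.foldl (fun d kv =>
      if d.contains kv.1 then
        d.insert kv.1 (PySem.Set.union (d.getD kv.1 []) kv.2)
      else
        d.insert kv.1 kv.2) merged).items

-- ===== PORT B =====
-- merged = {k: set() for g in (graph1, graph2) for k in g}  — the 'for g in (graph1, graph2)'
-- chaining is ported as a fold over graph1 ++ graph2; then the edge-streaming pass:
-- for k, vs in …: bucket = merged[k]; for v in vs: bucket.add(v)   (in-place add = Dict.modify)
def join_graphs_alt (graph1 : List (String × List String)) (graph2 : List (String × List String)) : List (String × List String) :=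
  let skel := (graph1 ++ graph2).foldl (fun d kv => d.insert kv.1 ([] : List String)) PySem.Dict.empty
  let filled := (graph1 ++ graph2).foldl
    (fun d kv => kv.2.foldl (fun d v => d.modify kv.1 [] (fun s => PySem.Set.add s v)) d) skel
  filled.items

-- ===== PRECONDITION & SPEC =====
-- Pre_ excludes association lists whose key lists or value lists contain duplicates:
-- such lists cannot represent a Python dict[str, set[str]] (dict keys and set elements are unique).
def Pre_join_graphs (graph1 : List (String × List String)) (graph2 : List (String × List String)) : Prop :=
  (graph1.map Prod.fst).Nodup ∧ (graph2.map Prod.fst).Nodup ∧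
  (∀ p ∈ graph1, p.2.Nodup) ∧ (∀ p ∈ graph2, p.2.Nodup)
instance (graph1 : List (String × List String)) (graph2 : List (String × List String)) : Decidable (Pre_join_graphs graph1 graph2) := by unfold Pre_join_graphs; infer_instance

def pvWitness_join_graphs : (List (String × List String)) × (List (String × List String)) :=
  ([("a", ["x", "y"])], [("a", ["z"]), ("b", [])])

def Spec_join_graphs (graph1 : List (String × List String)) (graph2 : List (String × List String)) (out : List (String × List String)) : Prop := out = join_graphs_alt graph1 graph2
instance (graph1 : List (String × List String)) (graph2 : List (String × List String)) (out : List (String × List String)) : Decidable (Spec_join_graphs graph1 graph2 out) := by unfold Spec_join_graphs; infer_instance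

-- ===== CLAIM (what is proved, stated in full; the proofs are below) =====
def Claim_equal_join_graphs : Prop := ∀ (graph1 : List (String × List String)) (graph2 : List (String × List String)), Dom_join_graphs graph1 graph2 → Pre_join_graphs graph1 graph2 → Spec_join_graphs graph1 graph2 (join_graphs graph1 graph2)

-- ===== LEMMAS AND PROOFS =====

-- the canonical merged value both ports are reduced to
def jgCanon (graph1 : List (String × List String)) (graph2 : List (String × List String)) : List (String × List String) :=
  (PySem.List.dedup (graph1.map Prod.fst ++ graph2.map Prod.fst)).map
    (fun k => (k, PySem.Set.union ((PySem.Dict.mk graph1).getD k [])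
                                  ((PySem.Dict.mk graph2).getD k [])))

-- the value a dict representing a set-valued Python dict holds is duplicate-free
lemma jg_getD_nodup (g : List (String × List String)) (hv : ∀ p ∈ g, p.2.Nodup) (k : String) :
    ((PySem.Dict.mk g).getD k ([] : List String)).Nodup := by
  cases h : (PySem.Dict.mk g).get? k with
  | none => rw [PySem.Dict.getD_of_get?_eq_none _ _ h]; exact List.nodup_nil
  | some v =>
    rw [PySem.Dict.getD_of_get?_eq_some _ _ h]
    exact hv (k, v) (PySem.Dict.mem_items_of_get?_eq_some _ h)

-- ---------- A side ----------

-- A's loop body, named so the lemmas can speak about it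
def jgStep (d : PySem.Dict String (List String)) (kv : String × List String) : PySem.Dict String (List String) :=
  if d.contains kv.1 then d.insert kv.1 (PySem.Set.union (d.getD kv.1 []) kv.2)
  else d.insert kv.1 kv.2

-- what A's loop leaves at key k (for graph2 with duplicate-free keys)
lemma jgStep_foldl_getD (l : List (String × List String)) (d : PySem.Dict String (List String)) (k : String)
    (hnd : (l.map Prod.fst).Nodup) :
    (l.foldl jgStep d).getD k [] =
      if (PySem.Dict.mk l).contains k then
        (if d.contains k then PySem.Set.union (d.getD k []) ((PySem.Dict.mk l).getD k [])
         else (PySem.Dict.mk l).getD k [])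
      else d.getD k [] := by
  induction l generalizing d with
  | nil => simp [PySem.Dict.contains_eq_decide_mem_keys, PySem.Dict.keys_mk]
  | cons p rest ih =>
    obtain ⟨a, v⟩ := p
    simp only [List.map_cons, List.nodup_cons] at hnd
    rw [List.foldl_cons, ih _ hnd.2]
    by_cases hk : k = a
    · have h1 : (PySem.Dict.mk rest).contains k = false := by
        simpa [PySem.Dict.contains_eq_decide_mem_keys, PySem.Dict.keys_mk, hk] using hnd.1
      have h2 : (PySem.Dict.mk ((a, v) :: rest)).contains k = true := by
        simp [PySem.Dict.contains_eq_decide_mem_keys, PySem.Dict.keys_mk, hk]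
      have h3 : (PySem.Dict.mk ((a, v) :: rest)).getD k [] = v := by
        simp [PySem.Dict.getD_eq_get?_getD, PySem.Dict.get?_mk_cons, hk]
      rw [h1, h2, h3, if_neg (by simp), if_pos rfl]
      subst hk
      unfold jgStep
      split <;> simp [*]
    · have h1 : (PySem.Dict.mk ((a, v) :: rest)).contains k = (PySem.Dict.mk rest).contains k := by
        simp [PySem.Dict.contains_eq_decide_mem_keys, PySem.Dict.keys_mk, hk]
      have h2 : (PySem.Dict.mk ((a, v) :: rest)).getD k [] = (PySem.Dict.mk rest).getD k [] := by
        simp [PySem.Dict.getD_eq_get?_getD, PySem.Dict.get?_mk_cons,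
          ((by simpa using fun he => hk he.symm) : (a == k) = false)]
      have h3 : (jgStep d (a, v)).getD k [] = d.getD k [] := by
        unfold jgStep; split <;> simp [PySem.Dict.getD_insert, hk]
      have h4 : (jgStep d (a, v)).contains k = d.contains k := by
        unfold jgStep; split <;> simp [PySem.Dict.contains_insert, ((by simpa using hk) : (k == a) = false)]
      rw [h1, h2, h3, h4]

-- A's loop body always inserts at kv.1 (fused form, for the keys-shape lemmas)
lemma jgStep_fused : jgStep = fun d (kv : String × List String) => d.insert kv.1
    (if d.contains kv.1 then PySem.Set.union (d.getD kv.1 []) kv.2 else kv.2) := by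
  funext d kv; unfold jgStep; split <;> rfl

-- A's key order is first-occurrence order over graph1 then graph2
lemma jgStep_foldl_keys (g1 g2 : List (String × List String)) (h1 : (g1.map Prod.fst).Nodup) :
    (g2.foldl jgStep (PySem.Dict.mk g1)).keys = PySem.List.dedup (g1.map Prod.fst ++ g2.map Prod.fst) := by
  rw [jgStep_fused, PySem.Dict.keys_foldl_insert_key, PySem.Dict.keys_mk,
    PySem.List.dedup_eq_ofList]
  rw [PySem.Set.ofList_eq_foldl, List.foldl_append, ← PySem.Set.ofList_eq_foldl,
    PySem.Set.ofList_eq_self_of_nodup _ h1, PySem.Set.update]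

lemma jgStep_foldl_nodup_keys (g1 g2 : List (String × List String)) (h1 : (g1.map Prod.fst).Nodup) :
    (g2.foldl jgStep (PySem.Dict.mk g1)).keys.Nodup := by
  rw [jgStep_fused]
  exact PySem.Dict.nodup_keys_foldl_insert_key _ _ _ _ (by rw [PySem.Dict.keys_mk]; exact h1)

-- A reduces to the canonical merge
lemma jg_A_canon (g1 g2 : List (String × List String))
    (h1 : (g1.map Prod.fst).Nodup) (h2 : (g2.map Prod.fst).Nodup)
    (hv2 : ∀ p ∈ g2, p.2.Nodup) :
    join_graphs g1 g2 = jgCanon g1 g2 := by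
  have hfold : join_graphs g1 g2 = (g2.foldl jgStep (PySem.Dict.mk g1)).items := rfl
  rw [hfold, PySem.Dict.items_eq_map_keys _ (jgStep_foldl_nodup_keys g1 g2 h1) ([] : List String),
    jgStep_foldl_keys g1 g2 h1]
  unfold jgCanon
  refine List.map_congr_left (fun k _ => ?_)
  rw [jgStep_foldl_getD g2 (PySem.Dict.mk g1) k h2]
  by_cases hc2 : (PySem.Dict.mk g2).contains k = true
  · rw [if_pos hc2]
    by_cases hc1 : (PySem.Dict.mk g1).contains k = true
    · rw [if_pos hc1]
    · rw [if_neg hc1, PySem.Dict.getD_of_not_contains _ ([] : List String) (Bool.eq_false_iff.mpr hc1)]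
      have hv : ((PySem.Dict.mk g2).getD k []).Nodup := jg_getD_nodup g2 hv2 k
      have hunion : PySem.Set.union ([] : List String) ((PySem.Dict.mk g2).getD k []) =
          PySem.Set.ofList ((PySem.Dict.mk g2).getD k []) := rfl
      rw [hunion, PySem.Set.ofList_eq_self_of_nodup _ hv]
  · rw [if_neg hc2, PySem.Dict.getD_of_not_contains _ ([] : List String) (Bool.eq_false_iff.mpr hc2)]
    rfl

-- ---------- B side ----------

-- B's edge-filling pass, named
def jgFill (d : PySem.Dict String (List String)) (kv : String × List String) : PySem.Dict String (List String) :=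
  kv.2.foldl (fun d v => d.modify kv.1 [] (fun s => PySem.Set.add s v)) d

-- the skeleton maps every key to []
lemma jg_skel_getD (l : List (String × List String)) (d : PySem.Dict String (List String))
    (h : ∀ k, d.getD k ([] : List String) = []) (k : String) :
    (l.foldl (fun d kv => d.insert kv.1 ([] : List String)) d).getD k [] = [] := by
  induction l generalizing d with
  | nil => exact h k
  | cons p rest ih =>
    refine ih _ (fun k' => ?_)
    rw [PySem.Dict.getD_insert]
    split
    · rfl
    · exact h k'

-- the skeleton's keys are all keys in first-occurrence order
lemma jg_skel_keys (g1 g2 : List (String × List String)) :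
    ((g1 ++ g2).foldl (fun d kv => d.insert kv.1 ([] : List String)) PySem.Dict.empty).keys =
      PySem.List.dedup (g1.map Prod.fst ++ g2.map Prod.fst) := by
  rw [PySem.Dict.keys_foldl_insert_key (key := Prod.fst) (f := fun _ _ => ([] : List String)),
    PySem.Dict.keys_empty, PySem.List.dedup_eq_ofList, ← List.map_append]
  exact PySem.Set.update_nil_left _

-- what one fill step leaves at key k
lemma jgFill_getD (vs : List String) (d : PySem.Dict String (List String)) (a k : String) :
    (vs.foldl (fun d v => d.modify a [] (fun s => PySem.Set.add s v)) d).getD k [] =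
      if k = a then PySem.Set.update (d.getD k []) vs else d.getD k [] := by
  induction vs generalizing d with
  | nil => split <;> rfl
  | cons v rest ih =>
    rw [List.foldl_cons, ih]
    by_cases hk : k = a
    · subst hk
      rw [if_pos rfl, if_pos rfl, PySem.Dict.getD_modify, if_pos rfl, PySem.Set.update_cons]
    · rw [if_neg hk, if_neg hk, PySem.Dict.getD_modify, if_neg hk]

-- one fill step does not change the key list (the key is already present)
lemma jgFill_keys (vs : List String) (d : PySem.Dict String (List String)) (a : String)
    (h : a ∈ d.keys) :
    (vs.foldl (fun d v => d.modify a [] (fun s => PySem.Set.add s v)) d).keys = d.keys := by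
  induction vs generalizing d with
  | nil => rfl
  | cons v rest ih =>
    have hc : d.contains a = true := (PySem.Dict.contains_iff_mem_keys d a).mpr h
    have hkeys : (d.modify a [] (fun s => PySem.Set.add s v)).keys = d.keys := by
      rw [PySem.Dict.keys_modify]; exact PySem.Dict.keys_insert_of_contains d _ hc
    rw [List.foldl_cons, ih _ (by rw [hkeys]; exact h), hkeys]

-- the whole filling pass does not change the key list
lemma jgFill_foldl_keys (l : List (String × List String)) (d : PySem.Dict String (List String))
    (h : ∀ kv ∈ l, kv.1 ∈ d.keys) :
    (l.foldl jgFill d).keys = d.keys := by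
  induction l generalizing d with
  | nil => rfl
  | cons p rest ih =>
    rw [List.foldl_cons]
    have hk : (jgFill d p).keys = d.keys := jgFill_keys p.2 d p.1 (h p (List.mem_cons_self))
    rw [ih (jgFill d p) (fun kv hkv => hk ▸ h kv (List.mem_cons_of_mem _ hkv)), hk]

-- what the whole filling pass leaves at key k: all edges of k, folded in
lemma jgFill_foldl_getD (l : List (String × List String)) (d : PySem.Dict String (List String))
    (k : String) :
    (l.foldl jgFill d).getD k [] =
      PySem.Set.update (d.getD k []) ((l.filter (fun p => p.1 == k)).flatMap Prod.snd) := by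
  induction l generalizing d with
  | nil => rfl
  | cons p rest ih =>
    obtain ⟨a, vs⟩ := p
    rw [List.foldl_cons, ih]
    have hstep : (jgFill d (a, vs)).getD k [] =
        if k = a then PySem.Set.update (d.getD k []) vs else d.getD k [] := jgFill_getD vs d a k
    by_cases hk : k = a
    · subst hk
      rw [hstep, if_pos rfl, List.filter_cons_of_pos (by simp), List.flatMap_cons,
        PySem.Set.update_append]
    · rw [hstep, if_neg hk, List.filter_cons_of_neg (by simpa using fun he => hk he.symm)]

-- the edges of key k in an association list with duplicate-free keys are exactly its value
lemma jg_filter_flatMap (g : List (String × List String)) (h : (g.map Prod.fst).Nodup) (k : String) :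
    (g.filter (fun p => p.1 == k)).flatMap Prod.snd = (PySem.Dict.mk g).getD k [] := by
  induction g with
  | nil => simp [PySem.Dict.getD_eq_get?_getD]; rfl
  | cons p rest ih =>
    obtain ⟨a, v⟩ := p
    simp only [List.map_cons, List.nodup_cons] at h
    by_cases hk : a = k
    · subst hk
      rw [List.filter_cons_of_pos (by simp)]
      have hrest : rest.filter (fun p => p.1 == a) = [] :=
        List.filter_eq_nil_iff.mpr (fun p hp => by
          simp only [beq_iff_eq]
          exact fun he => h.1 (he ▸ List.mem_map_of_mem (f := Prod.fst) hp))
      rw [List.flatMap_cons, hrest, List.flatMap_nil, List.append_nil,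
        PySem.Dict.getD_eq_get?_getD, PySem.Dict.get?_mk_cons, if_pos (by simp)]
      rfl
    · have h2 : (PySem.Dict.mk ((a, v) :: rest)).getD k [] = (PySem.Dict.mk rest).getD k [] := by
        simp [PySem.Dict.getD_eq_get?_getD, PySem.Dict.get?_mk_cons,
          ((by simpa using hk) : (a == k) = false)]
      rw [List.filter_cons_of_neg (by simpa using hk), ih h.2, h2]

-- B reduces to the canonical merge
lemma jg_B_canon (g1 g2 : List (String × List String))
    (h1 : (g1.map Prod.fst).Nodup) (h2 : (g2.map Prod.fst).Nodup)
    (hv1 : ∀ p ∈ g1, p.2.Nodup) :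
    join_graphs_alt g1 g2 = jgCanon g1 g2 := by
  have hsk : ((g1 ++ g2).foldl (fun d kv => d.insert kv.1 ([] : List String)) PySem.Dict.empty).keys =
      PySem.List.dedup (g1.map Prod.fst ++ g2.map Prod.fst) := jg_skel_keys g1 g2
  have hfold : join_graphs_alt g1 g2 =
      (((g1 ++ g2).foldl jgFill
        ((g1 ++ g2).foldl (fun d kv => d.insert kv.1 ([] : List String)) PySem.Dict.empty))).items := rfl
  have hkeys : (((g1 ++ g2).foldl jgFill
      ((g1 ++ g2).foldl (fun d kv => d.insert kv.1 ([] : List String)) PySem.Dict.empty))).keys =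
      PySem.List.dedup (g1.map Prod.fst ++ g2.map Prod.fst) := by
    rw [jgFill_foldl_keys _ _ (fun kv hkv => by
      rw [hsk, PySem.List.dedup_eq_ofList]
      exact (PySem.Set.mem_ofList _ _).mpr (by
        rw [← List.map_append]; exact List.mem_map_of_mem (f := Prod.fst) hkv)), hsk]
  have hnd : (((g1 ++ g2).foldl jgFill
      ((g1 ++ g2).foldl (fun d kv => d.insert kv.1 ([] : List String)) PySem.Dict.empty))).keys.Nodup := by
    rw [hkeys, PySem.List.dedup_eq_ofList]; exact PySem.Set.nodup_ofList _
  rw [hfold, PySem.Dict.items_eq_map_keys _ hnd ([] : List String), hkeys]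
  unfold jgCanon
  refine List.map_congr_left (fun k _ => ?_)
  rw [jgFill_foldl_getD, jg_skel_getD _ _ (fun k' => rfl) k, List.filter_append,
    List.flatMap_append, jg_filter_flatMap g1 h1 k, jg_filter_flatMap g2 h2 k,
    PySem.Set.update_append, PySem.Set.update_nil_left,
    PySem.Set.ofList_eq_self_of_nodup _ (jg_getD_nodup g1 hv1 k)]
  rfl

-- ===== VERDICT (by name: the statement is the Claim_ definition above) =====
theorem join_graphs_spec : Claim_equal_join_graphs := by
  intro g1 g2 _ hpre
  obtain ⟨h1, h2, hv1, hv2⟩ := hpre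
  unfold Spec_join_graphs
  rw [jg_A_canon g1 g2 h1 h2 hv2, jg_B_canon g1 g2 h1 h2 hv1]
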